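-- pv_equiv track=rewrite | github.com/hninah/DevConHackathon2026 | backend/src/rag_query.py | stream_answer_tokens
-- ===== SOURCE A (Python) =====
-- from collections.abc import Iterator
--
-- def stream_answer_tokens(raw_stream: Iterator[str]) -> Iterator[tuple[str, str | None]]:
--     """Yield clean answer tokens while accumulating Claude's full envelope.
--
--     The parser streams only text inside <answer> and keeps a small rolling buffer
--     so the closing </answer> tag is never emitted to the caller.
--     """
--     full_text = ""
--     state = "before_answer"
--     answer_hold = ""
--     closing_tag = "</answer>"
--     keep_chars = len(closing_tag) - 1
--
--     for token in raw_stream: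
--         full_text += token
--
--         if state == "before_answer":
--             start_index = full_text.lower().find("<answer>")
--             if start_index == -1:
--                 continue
--             state = "in_answer"
--             answer_hold = full_text[start_index + len("<answer>"):]
--         elif state == "in_answer":
--             answer_hold += token
--
--         if state != "in_answer":
--             continue
--
--         end_index = answer_hold.lower().find(closing_tag)
--         if end_index != -1:
--             emit_text = answer_hold[:end_index]
--             if emit_text:
--                 yield full_text, emit_text
--             state = "after_answer"
--             answer_hold = ""
--             continue
--
--         if len(answer_hold) > keep_chars:
--             emit_text = answer_hold[:-keep_chars]
--             answer_hold = answer_hold[-keep_chars:]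
--             if emit_text:
--                 yield full_text, emit_text
--
--     if state == "in_answer" and answer_hold:
--         yield full_text, answer_hold
--     else:
--         yield full_text, None
-- ===== SOURCE B (Python) =====
-- def stream_answer_tokens(raw_stream):
--     """Character-level state machine: each char advances a small tag matcher
--     (possible because '<' never recurs inside either tag), so no text is ever
--     rescanned or re-lowercased."""
--     open_tag = "<answer>"
--     close_tag = "</answer>"
--     full_text = ""
--     state = 0          # 0 = before <answer>, 1 = inside, 2 = after </answer>
--     matched = 0        # chars of the current tag matched so far
--     buf = ""           # held answer text not yet emitted
--
--     for token in raw_stream: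
--         full_text += token
--         state_at_start = state
--         for ch in token:
--             c = ch.lower()
--             if state == 0:
--                 if c == open_tag[matched]:
--                     matched += 1
--                     if matched == len(open_tag):
--                         state, matched, buf = 1, 0, ""
--                 elif c == "<":
--                     matched = 1
--                 else:
--                     matched = 0
--             elif state == 1:
--                 buf += ch
--                 if c == close_tag[matched]:
--                     matched += 1
--                     if matched == len(close_tag):
--                         state, matched = 2, 0
--                         buf = buf[:len(buf) - len(close_tag)]
--                 elif c == "<":
--                     matched = 1
--                 else:
--                     matched = 0
--         if state == 2 and state_at_start != 2:
--             if buf: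
--                 yield full_text, buf
--             buf = ""
--         elif state == 1 and len(buf) > len(close_tag) - 1:
--             cut = len(buf) - (len(close_tag) - 1)
--             yield full_text, buf[:cut]
--             buf = buf[cut:]
--
--     if state == 1 and buf:
--         yield full_text, buf
--     else:
--         yield full_text, None
-- ===== Notes on version B (the rewrite author's own statement) =====
-- stated objective: faster
-- what changed: B replaces A's per-token re-lowercasing and rescanning of the whole accumulated text (str.find on a growing buffer) with a character-level state machine that advances a constant-size tag matcher per character (valid because '<' never recurs inside either tag), so each character is examined once.
import Mathlib
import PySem

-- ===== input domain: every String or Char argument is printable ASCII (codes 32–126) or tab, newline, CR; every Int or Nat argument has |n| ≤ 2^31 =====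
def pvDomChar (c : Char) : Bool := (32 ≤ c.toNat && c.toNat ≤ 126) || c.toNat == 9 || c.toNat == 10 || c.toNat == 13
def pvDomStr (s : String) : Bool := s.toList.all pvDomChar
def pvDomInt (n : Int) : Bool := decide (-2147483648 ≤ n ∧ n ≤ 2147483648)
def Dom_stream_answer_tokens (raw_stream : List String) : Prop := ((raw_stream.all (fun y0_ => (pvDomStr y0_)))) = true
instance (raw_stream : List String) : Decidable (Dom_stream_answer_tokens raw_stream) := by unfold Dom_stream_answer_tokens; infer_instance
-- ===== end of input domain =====

-- B replaces A's per-token re-lowercasing and rescanning of the accumulated text (str.find on a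
-- growing buffer) by a per-character tag-matching state machine; objective: faster.

inductive PvMode | before | inAns | after
deriving DecidableEq, Repr

def pvOpen : List Char := "<answer>".toList
def pvClose : List Char := "</answer>".toList
def pvKeep : Nat := pvClose.length - 1

-- ===== PORT A =====
-- the code A reaches by fall-through after the state branches ("if state != 'in_answer': continue" … end of loop body)
def pvATail (full hold : List Char) (out : List (String × Option String)) :
    (List Char × PvMode × List Char) × List (String × Option String) :=
  let e := PySem.Chars.find (PySem.Chars.lower hold) pvClose
  if e ≠ -1 then
    let emit := PySem.List.slice hold none (some e)
    ((full, PvMode.after, ([] : List Char)),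
      if emit ≠ [] then out ++ [(String.ofList full, some (String.ofList emit))] else out)
  else if hold.length > pvKeep then
    let emit := PySem.List.slice hold none (some (-(pvKeep : Int)))
    let hold' := PySem.List.slice hold (some (-(pvKeep : Int))) none
    ((full, PvMode.inAns, hold'),
      if emit ≠ [] then out ++ [(String.ofList full, some (String.ofList emit))] else out)
  else ((full, PvMode.inAns, hold), out)

def pvAStep (st : (List Char × PvMode × List Char) × List (String × Option String)) (tok : String) :
    (List Char × PvMode × List Char) × List (String × Option String) :=
  match st with
  | ((full0, mode, hold), out) =>
    let full := full0 ++ tok.toList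
    match mode with
    | PvMode.before =>
      let i := PySem.Chars.find (PySem.Chars.lower full) pvOpen
      if i = -1 then ((full, PvMode.before, hold), out)
      else pvATail full (PySem.List.slice full (some (i + (pvOpen.length : Int))) none) out
    | PvMode.inAns => pvATail full (hold ++ tok.toList) out
    | PvMode.after => ((full, PvMode.after, hold), out)

def stream_answer_tokens (raw_stream : List String) : List (String × Option String) :=
  match raw_stream.foldl pvAStep (([], PvMode.before, []), []) with
  | ((full, mode, hold), out) =>
    if mode = PvMode.inAns ∧ hold ≠ [] then out ++ [(String.ofList full, some (String.ofList hold))]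
    else out ++ [(String.ofList full, none)]

-- ===== PORT B =====
-- per-character tag matcher: state 0 = before <answer>, 1 = inside, 2 = after </answer>;
-- `matched` counts tag characters matched so far (it stays < tag length, so getD never defaults)
def pvFeed (st : Nat × Nat × List Char) (ch : Char) : Nat × Nat × List Char :=
  match st with
  | (state, matched, buf) =>
    let c := PySem.Chars.lowerChar ch
    if state = 0 then
      if c = pvOpen.getD matched ' ' then
        if matched + 1 = pvOpen.length then (1, 0, []) else (0, matched + 1, buf)
      else if c = '<' then (0, 1, buf) else (0, 0, buf)
    else if state = 1 then
      let buf' := buf ++ [ch]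
      if c = pvClose.getD matched ' ' then
        if matched + 1 = pvClose.length then (2, 0, buf'.take (buf'.length - pvClose.length))
        else (1, matched + 1, buf')
      else if c = '<' then (1, 1, buf') else (1, 0, buf')
    else st

-- end-of-token emission (the tail of Source B's loop body)
def pvBEnd (full : List Char) (s0 : Nat) (r : Nat × Nat × List Char)
    (out : List (String × Option String)) :
    (List Char × (Nat × Nat × List Char)) × List (String × Option String) :=
  match r with
  | (s1, m1, buf1) =>
    if s1 = 2 ∧ s0 ≠ 2 then
      ((full, (2, m1, [])),
        if buf1 ≠ [] then out ++ [(String.ofList full, some (String.ofList buf1))] else out)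
    else if s1 = 1 ∧ buf1.length > pvClose.length - 1 then
      let cut := buf1.length - (pvClose.length - 1)
      ((full, (1, m1, buf1.drop cut)), out ++ [(String.ofList full, some (String.ofList (buf1.take cut)))])
    else ((full, (s1, m1, buf1)), out)

def pvBTok (st : (List Char × (Nat × Nat × List Char)) × List (String × Option String)) (tok : String) :
    (List Char × (Nat × Nat × List Char)) × List (String × Option String) :=
  match st with
  | ((full0, ms), out) => pvBEnd (full0 ++ tok.toList) ms.1 (tok.toList.foldl pvFeed ms) out

def stream_answer_tokens_alt (raw_stream : List String) : List (String × Option String) :=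
  match raw_stream.foldl pvBTok (([], (0, 0, [])), []) with
  | ((full, (s, _, buf)), out) =>
    if s = 1 ∧ buf ≠ [] then out ++ [(String.ofList full, some (String.ofList buf))]
    else out ++ [(String.ofList full, none)]

-- ===== PRECONDITION & SPEC =====
def Spec_stream_answer_tokens (raw_stream : List String) (out : List (String × Option String)) : Prop := out = stream_answer_tokens_alt raw_stream
instance (raw_stream : List String) (out : List (String × Option String)) : Decidable (Spec_stream_answer_tokens raw_stream out) := by unfold Spec_stream_answer_tokens; infer_instance

-- ===== CLAIM (what is proved, stated in full; the proofs are below) =====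
def Claim_equal_stream_answer_tokens : Prop := ∀ (raw_stream : List String), Dom_stream_answer_tokens raw_stream → Spec_stream_answer_tokens raw_stream (stream_answer_tokens raw_stream)

-- ===== LEMMAS AND PROOFS =====

lemma pvClose_len : pvClose.length = 9 := by decide
lemma pvKeep_eq : pvKeep = 8 := by decide

/-- the last `k` characters -/
def pvTR (s : List Char) (k : Nat) : List Char := s.drop (s.length - k)

/-- `i` is the longest proper prefix of the tag `p` that is a suffix of the scanned text `s` -/
def PvBInv (p s : List Char) (i : Nat) : Prop :=
  i < p.length ∧ i ≤ s.length ∧ p.take i = pvTR s i ∧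
    ∀ k, i < k → k < p.length → k ≤ s.length → p.take k ≠ pvTR s k

/-- tag shape: starts with '<' and '<' never recurs inside -/
def PvTag (p : List Char) : Prop :=
  2 ≤ p.length ∧ p[0]? = some '<' ∧ ∀ j, 1 ≤ j → j < p.length → p[j]? ≠ some '<'

lemma pvTag_open : PvTag pvOpen := by
  refine ⟨by decide, by decide, ?_⟩
  intro j h1 h2
  rw [show pvOpen.length = 8 from by decide] at h2
  interval_cases j <;> decide

lemma pvTag_close : PvTag pvClose := by
  refine ⟨by decide, by decide, ?_⟩
  intro j h1 h2
  rw [show pvClose.length = 9 from by decide] at h2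
  interval_cases j <;> decide

lemma pvTR_zero (s : List Char) : pvTR s 0 = [] := by simp [pvTR]

lemma pvTR_length (s : List Char) (k : Nat) (h : k ≤ s.length) : (pvTR s k).length = k := by
  simp [pvTR]; omega

lemma pvTR_append_singleton (s : List Char) (c : Char) (k : Nat) (h : k ≤ s.length) :
    pvTR (s ++ [c]) (k + 1) = pvTR s k ++ [c] := by
  unfold pvTR
  have h1 : (s ++ [c]).length - (k + 1) = s.length - k := by simp
  rw [h1, List.drop_append_of_le_length (by omega)]

lemma pvTR_pvTR (s : List Char) (j k : Nat) (hj : j ≤ k) (hk : k ≤ s.length) :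
    pvTR (pvTR s k) j = pvTR s j := by
  unfold pvTR
  rw [List.length_drop, List.drop_drop]
  congr 1
  omega

lemma pv_lower_append (s t : List Char) :
    PySem.Chars.lower (s ++ t) = PySem.Chars.lower s ++ PySem.Chars.lower t := by
  simp [PySem.Chars.lower]

lemma pv_lower_length (s : List Char) : (PySem.Chars.lower s).length = s.length := by
  simp [PySem.Chars.lower]

lemma pv_lower_singleton (c : Char) : PySem.Chars.lower [c] = [PySem.Chars.lowerChar c] := by
  simp [PySem.Chars.lower]

lemma pv_lower_drop (s : List Char) (n : Nat) :
    (PySem.Chars.lower s).drop n = PySem.Chars.lower (s.drop n) := by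
  simp [PySem.Chars.lower, List.map_drop]

lemma pv_lower_pvTR (s : List Char) (k : Nat) :
    pvTR (PySem.Chars.lower s) k = PySem.Chars.lower (pvTR s k) := by
  unfold pvTR
  rw [pv_lower_length, pv_lower_drop]

lemma pv_getD_eq (p : List Char) (i : Nat) (h : i < p.length) : p[i]? = some (p.getD i ' ') := by
  rw [List.getD_eq_getElem?_getD, List.getElem?_eq_getElem h]
  simp

lemma pv_border_restrict (p s : List Char) (i j : Nat) (hj : j ≤ i) (hi : i ≤ s.length)
    (h : p.take i = pvTR s i) : pvTR s j = (p.take i).drop (i - j) := by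
  have hlen : (p.take i).length = i := by rw [h]; exact pvTR_length s i hi
  rw [← pvTR_pvTR s j i hj hi, ← h]
  unfold pvTR
  rw [hlen]

lemma pv_no_mid_border (p s : List Char) (i j : Nat) (hT : PvTag p) (hj1 : 1 ≤ j) (hji : j < i)
    (hiL : i < p.length) (his : i ≤ s.length) (hi : p.take i = pvTR s i) :
    p.take j ≠ pvTR s j := by
  intro hEq
  rw [pv_border_restrict p s i j (le_of_lt hji) his hi] at hEq
  have h0 : (p.take j)[0]? = ((p.take i).drop (i - j))[0]? := by rw [hEq]
  rw [List.getElem?_take_of_lt (by omega), List.getElem?_drop, List.getElem?_take_of_lt (by omega)] at h0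
  have h1 : p[i - j + 0]? = some '<' := h0.symm.trans hT.2.1
  exact hT.2.2 (i - j) (by omega) (by omega) (by simpa using h1)

lemma pv_match_step_hit (p s : List Char) (i : Nat) (c : Char)
    (hinv : PvBInv p s i) (hc : c = p.getD i ' ') :
    p.take (i + 1) = pvTR (s ++ [c]) (i + 1) ∧ (i + 1 < p.length → PvBInv p (s ++ [c]) (i + 1)) := by
  obtain ⟨hiL, his, htake, hmax⟩ := hinv
  have htake' : p.take (i + 1) = pvTR (s ++ [c]) (i + 1) := by
    rw [pvTR_append_singleton s c i his, ← htake, List.take_add_one, pv_getD_eq p i hiL, ← hc]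
    rfl
  refine ⟨htake', fun hi1 => ⟨hi1, by simp; omega, htake', ?_⟩⟩
  intro k hk1 hkL hks hEq
  obtain ⟨k', rfl⟩ : ∃ k', k = k' + 1 := ⟨k - 1, by omega⟩
  have hks' : k' ≤ s.length := by simp at hks; omega
  rw [pvTR_append_singleton s c k' hks', List.take_add_one, pv_getD_eq p k' (by omega)] at hEq
  obtain ⟨h1, h2⟩ := List.append_inj' hEq (by simp)
  exact hmax k' (by omega) (by omega) hks' h1

lemma pv_match_step_miss (p s : List Char) (i : Nat) (c : Char) (hT : PvTag p)
    (hinv : PvBInv p s i) (hc : c ≠ p.getD i ' ') :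
    PvBInv p (s ++ [c]) (if c = '<' then 1 else 0) := by
  obtain ⟨hiL, his, htake, hmax⟩ := hinv
  obtain ⟨hL2, hp0, hpt⟩ := hT
  have hgd0 : p.getD 0 ' ' = '<' := by
    have := pv_getD_eq p 0 (by omega)
    rw [hp0] at this
    exact (Option.some_inj.mp this).symm
  have hmax' : ∀ k, (if c = '<' then 1 else 0) < k → k < p.length → k ≤ (s ++ [c]).length →
      p.take k ≠ pvTR (s ++ [c]) k := by
    intro k hk1 hkL hks hEq
    obtain ⟨k', rfl⟩ : ∃ k', k = k' + 1 := ⟨k - 1, by omega⟩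
    have hks' : k' ≤ s.length := by simp at hks; omega
    rw [pvTR_append_singleton s c k' hks', List.take_add_one, pv_getD_eq p k' (by omega)] at hEq
    obtain ⟨h1, h2⟩ := List.append_inj' hEq (by simp)
    have hck' : p.getD k' ' ' = c := by simpa using h2
    rcases Nat.lt_trichotomy k' i with hk | hk | hk
    · rcases Nat.eq_zero_or_pos k' with h0 | h0
      · subst h0
        have hcc : c = '<' := by rw [← hck', hgd0]
        rw [if_pos hcc] at hk1
        omega
      · exact pv_no_mid_border p s i k' ⟨hL2, hp0, hpt⟩ h0 hk hiL his htake h1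
    · exact hc (by rw [hk] at hck'; exact hck'.symm)
    · exact hmax k' hk (by omega) hks' h1
  refine ⟨by split_ifs <;> omega, by split_ifs <;> simp, ?_, hmax'⟩
  split_ifs with hcc
  · rw [pvTR_append_singleton s c 0 (by omega), pvTR_zero, List.take_add_one, pv_getD_eq p 0 (by omega), hgd0, hcc]
    rfl
  · rw [pvTR_zero]
    rfl

lemma pv_match_complete (p s : List Char) (i : Nat) (c : Char)
    (hinv : PvBInv p s i) (hc : c = p.getD i ' ') (hL : i + 1 = p.length) :
    p = pvTR (s ++ [c]) p.length := by
  have h := (pv_match_step_hit p s i c hinv hc).1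
  rw [hL, List.take_length] at h
  exact h

/-- `find` returns the unique first occurrence. -/
lemma pv_find_eq_of_first (w p : List Char) (i : Nat) (hocc : p <+: w.drop i)
    (hmin : ∀ j < i, ¬ p <+: w.drop j) : PySem.Chars.find w p = (i : Int) := by
  have hinf : p <:+: w := hocc.isInfix.trans (List.drop_suffix i w).isInfix
  have h0 : 0 ≤ PySem.Chars.find w p := (PySem.Chars.find_nonneg_iff w p).2 hinf
  obtain ⟨hpre, hlt⟩ := PySem.Chars.find_spec h0
  set n := (PySem.Chars.find w p).toNat with hn
  have : n = i := by
    rcases Nat.lt_trichotomy n i with h | h | h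
    · exact absurd hpre (hmin n h)
    · exact h
    · exact absurd hocc (hlt i h)
  omega

lemma pv_no_occ_singleton (p s : List Char) (i : Nat) (c : Char) (hT : PvTag p)
    (hinv : PvBInv p s i) (hno : ¬ p <:+: s) (hnc : ¬ (c = p.getD i ' ' ∧ i + 1 = p.length)) :
    ¬ p <:+: (s ++ [c]) := by
  intro hinf
  obtain ⟨hiL, his, htake, hmax⟩ := hinv
  obtain ⟨hL2, hp0, hpt⟩ := hT
  have h0 : 0 ≤ PySem.Chars.find (s ++ [c]) p := (PySem.Chars.find_nonneg_iff _ _).2 hinf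
  obtain ⟨hpre, _⟩ := PySem.Chars.find_spec h0
  set j := (PySem.Chars.find (s ++ [c]) p).toNat with hj
  have hjlen : j + p.length ≤ s.length + 1 := by
    have := hpre.length_le
    simp at this
    omega
  by_cases hcase : j + p.length ≤ s.length
  · have hj_le : j ≤ s.length := by omega
    rw [List.drop_append_of_le_length hj_le] at hpre
    have : p <+: s.drop j := (List.isPrefix_append_of_length (by simp; omega)).mp hpre
    exact hno (this.isInfix.trans (List.drop_suffix j s).isInfix)
  · have hjL : j + p.length = s.length + 1 := by omega
    have hdropLen : ((s ++ [c]).drop j).length = p.length := by simp; omega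
    have hpeq : p = (s ++ [c]).drop j := List.IsPrefix.eq_of_length hpre (by rw [hdropLen])
    obtain ⟨L', hL'⟩ : ∃ L', p.length = L' + 1 := ⟨p.length - 1, by omega⟩
    have hLs : L' ≤ s.length := by omega
    have hptr' : p = pvTR s L' ++ [c] := by
      rw [hpeq]
      rw [← pvTR_append_singleton s c L' hLs]
      unfold pvTR
      congr 1
      simp
      omega
    have hl : (pvTR s L').length = L' := pvTR_length s L' hLs
    have htk : p.take L' = pvTR s L' := by
      rw [hptr', List.take_append_of_le_length hl.ge, List.take_of_length_le hl.le]
    have hcl : p.getD L' ' ' = c := by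
      have hgl : (pvTR s L' ++ [c])[L']? = some c := by
        have hx : (pvTR s L' ++ [c])[(pvTR s L').length]? = some c := List.getElem?_concat_length
        rwa [hl] at hx
      have h1 : p[L']? = some c := by rw [hptr']; exact hgl
      have h2 := pv_getD_eq p L' (by omega)
      rw [h1] at h2
      exact (Option.some_inj.mp h2).symm
    rcases Nat.lt_trichotomy i L' with hk | hk | hk
    · exact hmax L' hk (by omega) hLs htk
    · exact hnc ⟨by rw [hk]; exact hcl.symm, by omega⟩
    · omega

def PvSt0 (full : List Char) (i : Nat) : Prop :=
  PvBInv pvOpen (PySem.Chars.lower full) i ∧ ¬ pvOpen <:+: PySem.Chars.lower full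

def PvSt1 (buf : List Char) (i : Nat) : Prop :=
  PvBInv pvClose (PySem.Chars.lower buf) i ∧ ¬ pvClose <:+: PySem.Chars.lower buf

lemma pv_binv_nil (p : List Char) (h : 0 < p.length) : PvBInv p [] 0 :=
  ⟨h, by simp, by simp [pvTR], fun k hk _ hks => by simp at hks; exact absurd hk (by omega)⟩

lemma pv_st0_nil : PvSt0 [] 0 := by
  constructor
  · exact pv_binv_nil pvOpen (by decide)
  · intro h
    have : pvOpen = [] := by simpa [PySem.Chars.lower] using h
    exact absurd this (by decide)

lemma pv_st1_nil : PvSt1 [] 0 := by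
  constructor
  · exact pv_binv_nil pvClose (by decide)
  · intro h
    have : pvClose = [] := by simpa [PySem.Chars.lower] using h
    exact absurd this (by decide)

lemma pvFeed_0 (i : Nat) (b : List Char) (ch : Char) :
    pvFeed (0, i, b) ch =
      (if PySem.Chars.lowerChar ch = pvOpen.getD i ' ' then
        (if i + 1 = pvOpen.length then (1, 0, ([] : List Char)) else (0, i + 1, b))
       else if PySem.Chars.lowerChar ch = '<' then (0, 1, b) else (0, 0, b)) := by
  simp [pvFeed]

lemma pvFeed_1 (i : Nat) (b : List Char) (ch : Char) :
    pvFeed (1, i, b) ch =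
      (if PySem.Chars.lowerChar ch = pvClose.getD i ' ' then
        (if i + 1 = pvClose.length then (2, 0, (b ++ [ch]).take ((b ++ [ch]).length - pvClose.length))
         else (1, i + 1, b ++ [ch]))
       else if PySem.Chars.lowerChar ch = '<' then (1, 1, b ++ [ch]) else (1, 0, b ++ [ch])) := by
  simp [pvFeed]

lemma pvFeed_2 (i : Nat) (b : List Char) (ch : Char) : pvFeed (2, i, b) ch = (2, i, b) := by
  simp [pvFeed]

lemma pv_run2 (cs : List Char) (i : Nat) (b : List Char) :
    cs.foldl pvFeed (2, i, b) = (2, i, b) := by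
  induction cs with
  | nil => rfl
  | cons c cs ih => rw [List.foldl_cons, pvFeed_2]; exact ih

lemma pv_run1 (cs : List Char) : ∀ (b : List Char) (i : Nat), PvSt1 b i →
    (∃ i', cs.foldl pvFeed (1, i, b) = (1, i', b ++ cs) ∧ PvSt1 (b ++ cs) i')
  ∨ (∃ u c v, cs = u ++ c :: v ∧ ¬ pvClose <:+: PySem.Chars.lower (b ++ u) ∧
       pvClose = pvTR (PySem.Chars.lower (b ++ (u ++ [c]))) pvClose.length ∧
       cs.foldl pvFeed (1, i, b) =
         (2, 0, (b ++ (u ++ [c])).take ((b ++ (u ++ [c])).length - pvClose.length))) := by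
  induction cs with
  | nil => intro b i h; exact Or.inl ⟨i, by simp, by simpa using h⟩
  | cons c cs ih =>
    intro b i h
    obtain ⟨hinv, hno⟩ := h
    have hiL : i < pvClose.length := hinv.1
    have hlow : PySem.Chars.lower (b ++ [c]) =
        PySem.Chars.lower b ++ [PySem.Chars.lowerChar c] := by
      rw [pv_lower_append, pv_lower_singleton]
    rw [List.foldl_cons, pvFeed_1]
    by_cases h1 : PySem.Chars.lowerChar c = pvClose.getD i ' '
    · by_cases h2 : i + 1 = pvClose.length
      · refine Or.inr ⟨[], c, cs, by simp, by simpa using hno, ?_, ?_⟩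
        · have := pv_match_complete pvClose (PySem.Chars.lower b) i (PySem.Chars.lowerChar c)
            (by simpa [pv_lower_length] using hinv) h1 h2
          rw [← hlow] at this
          simpa using this
        · rw [if_pos h1, if_pos h2, pv_run2]
          simp
      · have hlt : i + 1 < pvClose.length := by omega
        have hinv' : PvBInv pvClose (PySem.Chars.lower (b ++ [c])) (i + 1) := by
          rw [hlow]
          exact (pv_match_step_hit pvClose (PySem.Chars.lower b) i (PySem.Chars.lowerChar c)
            (by simpa [pv_lower_length] using hinv) h1).2 hlt
        have hno' : ¬ pvClose <:+: PySem.Chars.lower (b ++ [c]) := by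
          rw [hlow]
          exact pv_no_occ_singleton pvClose (PySem.Chars.lower b) i (PySem.Chars.lowerChar c)
            pvTag_close (by simpa [pv_lower_length] using hinv) hno (by tauto)
        rw [if_pos h1, if_neg h2]
        rcases ih (b ++ [c]) (i + 1) ⟨by simpa [pv_lower_length] using hinv', hno'⟩ with
          ⟨i', hf, hs⟩ | ⟨u, c', v, hcs, hn, hocc, hf⟩
        · exact Or.inl ⟨i', by rw [hf]; simp, by simpa using hs⟩
        · refine Or.inr ⟨c :: u, c', v, by rw [hcs, List.cons_append], ?_, ?_, ?_⟩
          · rwa [← List.append_cons] at hn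
          · rw [show b ++ (c :: u ++ [c']) = b ++ [c] ++ (u ++ [c']) by simp]; exact hocc
          · rw [hf, show b ++ (c :: u ++ [c']) = b ++ [c] ++ (u ++ [c']) by simp]
    · have hinv' : PvBInv pvClose (PySem.Chars.lower (b ++ [c]))
          (if PySem.Chars.lowerChar c = '<' then 1 else 0) := by
        rw [hlow]
        exact pv_match_step_miss pvClose (PySem.Chars.lower b) i (PySem.Chars.lowerChar c)
          pvTag_close (by simpa [pv_lower_length] using hinv) h1
      have hno' : ¬ pvClose <:+: PySem.Chars.lower (b ++ [c]) := by
        rw [hlow]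
        exact pv_no_occ_singleton pvClose (PySem.Chars.lower b) i (PySem.Chars.lowerChar c)
          pvTag_close (by simpa [pv_lower_length] using hinv) hno (by tauto)
      rw [if_neg h1]
      have hnext : (if PySem.Chars.lowerChar c = '<' then (1, 1, b ++ [c])
          else (1, 0, b ++ [c])) = ((1 : Nat), (if PySem.Chars.lowerChar c = '<' then 1 else 0), b ++ [c]) := by
        split_ifs <;> rfl
      rw [hnext]
      rcases ih (b ++ [c]) (if PySem.Chars.lowerChar c = '<' then 1 else 0)
          ⟨hinv', hno'⟩ with ⟨i', hf, hs⟩ | ⟨u, c', v, hcs, hn, hocc, hf⟩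
      · exact Or.inl ⟨i', by rw [hf]; simp, by simpa using hs⟩
      · refine Or.inr ⟨c :: u, c', v, by rw [hcs, List.cons_append], ?_, ?_, ?_⟩
        · rwa [← List.append_cons] at hn
        · rw [show b ++ (c :: u ++ [c']) = b ++ [c] ++ (u ++ [c']) by simp]; exact hocc
        · rw [hf, show b ++ (c :: u ++ [c']) = b ++ [c] ++ (u ++ [c']) by simp]

lemma pv_run0 (cs : List Char) : ∀ (full : List Char) (i : Nat) (b : List Char), PvSt0 full i →
    (∃ i', cs.foldl pvFeed (0, i, b) = (0, i', b) ∧ PvSt0 (full ++ cs) i')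
  ∨ (∃ u c v, cs = u ++ c :: v ∧ ¬ pvOpen <:+: PySem.Chars.lower (full ++ u) ∧
       pvOpen = pvTR (PySem.Chars.lower (full ++ (u ++ [c]))) pvOpen.length ∧
       cs.foldl pvFeed (0, i, b) = v.foldl pvFeed (1, 0, [])) := by
  induction cs with
  | nil => intro full i b h; exact Or.inl ⟨i, by simp, by simpa using h⟩
  | cons c cs ih =>
    intro full i b h
    obtain ⟨hinv, hno⟩ := h
    have hiL : i < pvOpen.length := hinv.1
    have hlow : PySem.Chars.lower (full ++ [c]) =
        PySem.Chars.lower full ++ [PySem.Chars.lowerChar c] := by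
      rw [pv_lower_append, pv_lower_singleton]
    rw [List.foldl_cons, pvFeed_0]
    by_cases h1 : PySem.Chars.lowerChar c = pvOpen.getD i ' '
    · by_cases h2 : i + 1 = pvOpen.length
      · refine Or.inr ⟨[], c, cs, by simp, by simpa using hno, ?_, ?_⟩
        · have := pv_match_complete pvOpen (PySem.Chars.lower full) i (PySem.Chars.lowerChar c)
            (by simpa [pv_lower_length] using hinv) h1 h2
          rw [← hlow] at this
          simpa using this
        · rw [if_pos h1, if_pos h2]
      · have hlt : i + 1 < pvOpen.length := by omega
        have hinv' : PvBInv pvOpen (PySem.Chars.lower (full ++ [c])) (i + 1) := by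
          rw [hlow]
          exact (pv_match_step_hit pvOpen (PySem.Chars.lower full) i (PySem.Chars.lowerChar c)
            (by simpa [pv_lower_length] using hinv) h1).2 hlt
        have hno' : ¬ pvOpen <:+: PySem.Chars.lower (full ++ [c]) := by
          rw [hlow]
          exact pv_no_occ_singleton pvOpen (PySem.Chars.lower full) i (PySem.Chars.lowerChar c)
            pvTag_open (by simpa [pv_lower_length] using hinv) hno (by tauto)
        rw [if_pos h1, if_neg h2]
        rcases ih (full ++ [c]) (i + 1) b ⟨hinv', hno'⟩ with
          ⟨i', hf, hs⟩ | ⟨u, c', v, hcs, hn, hocc, hf⟩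
        · exact Or.inl ⟨i', hf, by rwa [← List.append_cons] at hs⟩
        · refine Or.inr ⟨c :: u, c', v, by rw [hcs, List.cons_append], ?_, ?_, hf⟩
          · rwa [← List.append_cons] at hn
          · rw [show full ++ (c :: u ++ [c']) = full ++ [c] ++ (u ++ [c']) by simp]; exact hocc
    · have hinv' : PvBInv pvOpen (PySem.Chars.lower (full ++ [c]))
          (if PySem.Chars.lowerChar c = '<' then 1 else 0) := by
        rw [hlow]
        exact pv_match_step_miss pvOpen (PySem.Chars.lower full) i (PySem.Chars.lowerChar c)
          pvTag_open (by simpa [pv_lower_length] using hinv) h1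
      have hno' : ¬ pvOpen <:+: PySem.Chars.lower (full ++ [c]) := by
        rw [hlow]
        exact pv_no_occ_singleton pvOpen (PySem.Chars.lower full) i (PySem.Chars.lowerChar c)
          pvTag_open (by simpa [pv_lower_length] using hinv) hno (by tauto)
      rw [if_neg h1]
      have hnext : (if PySem.Chars.lowerChar c = '<' then ((0 : Nat), (1 : Nat), b)
          else (0, 0, b)) = ((0 : Nat), (if PySem.Chars.lowerChar c = '<' then 1 else 0), b) := by
        split_ifs <;> rfl
      rw [hnext]
      rcases ih (full ++ [c]) (if PySem.Chars.lowerChar c = '<' then 1 else 0) b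
          ⟨hinv', hno'⟩ with ⟨i', hf, hs⟩ | ⟨u, c', v, hcs, hn, hocc, hf⟩
      · exact Or.inl ⟨i', hf, by rwa [← List.append_cons] at hs⟩
      · refine Or.inr ⟨c :: u, c', v, by rw [hcs, List.cons_append], ?_, ?_, hf⟩
        · rwa [← List.append_cons] at hn
        · rw [show full ++ (c :: u ++ [c']) = full ++ [c] ++ (u ++ [c']) by simp]; exact hocc

lemma pv_find_completion (x rest p : List Char) (c : Char) (hp : 0 < p.length)
    (hno : ¬ p <:+: x) (hocc : p = pvTR (x ++ [c]) p.length) :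
    PySem.Chars.find (x ++ [c] ++ rest) p = (((x ++ [c]).length - p.length : Nat) : Int) := by
  have hlen : p.length ≤ x.length + 1 := by
    have := congrArg List.length hocc
    simp [pvTR] at this
    omega
  have hi0 : (x ++ [c]).length - p.length = x.length + 1 - p.length := by simp
  rw [hi0]
  apply pv_find_eq_of_first
  · rw [List.drop_append_of_le_length (by simp)]
    have : (x ++ [c]).drop (x.length + 1 - p.length) = pvTR (x ++ [c]) p.length := by
      unfold pvTR
      congr 1
      simp
    rw [this, ← hocc]
    exact List.prefix_append p rest
  · intro j hj hpre
    have hjx : j ≤ x.length := by omega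
    rw [List.append_assoc, List.drop_append_of_le_length hjx] at hpre
    have : p <+: x.drop j := (List.isPrefix_append_of_length (by simp; omega)).mp hpre
    exact hno (this.isInfix.trans (List.drop_suffix j x).isInfix)

lemma pv_slice_to_nat (l : List Char) (k : Nat) :
    PySem.List.slice l none (some (k : Int)) = l.take k := by
  rw [PySem.List.slice_to l (by positivity)]
  congr 1

lemma pv_slice_from_nat (l : List Char) (k : Nat) :
    PySem.List.slice l (some (k : Int)) none = l.drop k := by
  rw [PySem.List.slice_from l (by positivity)]
  congr 1

lemma pv_st1_trim (x : List Char) (i k : Nat) (h : PvSt1 x i) (hik : i ≤ k) (hk : k ≤ x.length) :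
    PvSt1 (x.drop (x.length - k)) i := by
  obtain ⟨⟨hiL, his, ht, hm⟩, hno⟩ := h
  have hxk : x.drop (x.length - k) = pvTR x k := rfl
  have hlowtrim : PySem.Chars.lower (pvTR x k) = pvTR (PySem.Chars.lower x) k :=
    (pv_lower_pvTR x k).symm
  have hlen : (PySem.Chars.lower x).length = x.length := pv_lower_length x
  constructor
  · refine ⟨hiL, ?_, ?_, ?_⟩
    · rw [hxk, hlowtrim, pvTR_length _ k (by omega)]
      exact hik
    · rw [hxk, hlowtrim, pvTR_pvTR _ i k hik (by omega)]
      exact ht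
    · intro k' hk1 hk2 hk3
      rw [hxk, hlowtrim] at hk3 ⊢
      rw [pvTR_length _ k (by omega)] at hk3
      rw [pvTR_pvTR _ k' k hk3 (by omega)]
      exact hm k' hk1 hk2 (by omega)
  · rw [hxk, hlowtrim]
    intro hinf
    exact hno (hinf.trans (List.drop_suffix _ _).isInfix)

def PvRel (sa : (List Char × PvMode × List Char) × List (String × Option String))
    (sb : (List Char × (Nat × Nat × List Char)) × List (String × Option String)) : Prop :=
  sa.1.1 = sb.1.1 ∧ sa.2 = sb.2 ∧
    ((sa.1.2.1 = PvMode.before ∧ sb.1.2.1 = 0 ∧ PvSt0 sa.1.1 sb.1.2.2.1)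
     ∨ (sa.1.2.1 = PvMode.inAns ∧ sb.1.2.1 = 1 ∧ sa.1.2.2 = sb.1.2.2.2 ∧ PvSt1 sb.1.2.2.2 sb.1.2.2.1)
     ∨ (sa.1.2.1 = PvMode.after ∧ sb.1.2.1 = 2))

lemma pvATail_close (full hold : List Char) (out : List (String × Option String)) (eN : Nat)
    (h : PySem.Chars.find (PySem.Chars.lower hold) pvClose = (eN : Int)) :
    pvATail full hold out = ((full, PvMode.after, []),
      if hold.take eN ≠ [] then out ++ [(String.ofList full, some (String.ofList (hold.take eN)))]
      else out) := by
  simp only [pvATail, h]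
  rw [if_pos (show ((eN : Int) ≠ -1) by omega), pv_slice_to_nat]

lemma pvATail_none_trim (full hold : List Char) (out : List (String × Option String))
    (h : PySem.Chars.find (PySem.Chars.lower hold) pvClose = -1) (hlen : hold.length > pvKeep) :
    pvATail full hold out = ((full, PvMode.inAns, hold.drop (hold.length - pvKeep)),
      out ++ [(String.ofList full, some (String.ofList (hold.take (hold.length - pvKeep))))]) := by
  simp only [pvATail, h]
  rw [if_neg (by simp), if_pos hlen,
    PySem.List.slice_to_neg_natCast hold pvKeep (by rw [pvKeep_eq]; omega),
    PySem.List.slice_from_neg_natCast hold pvKeep (by rw [pvKeep_eq]; omega),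
    if_pos (show hold.take (hold.length - pvKeep) ≠ [] by
      intro hempty
      have := congrArg List.length hempty
      simp at this
      omega)]

lemma pvATail_none_keep (full hold : List Char) (out : List (String × Option String))
    (h : PySem.Chars.find (PySem.Chars.lower hold) pvClose = -1) (hlen : ¬ hold.length > pvKeep) :
    pvATail full hold out = ((full, PvMode.inAns, hold), out) := by
  simp only [pvATail, h]
  rw [if_neg (by simp), if_neg hlen]

lemma pvBEnd_state0 (full : List Char) (s0 m1 : Nat) (buf1 : List Char)
    (out : List (String × Option String)) :
    pvBEnd full s0 (0, m1, buf1) out = ((full, (0, m1, buf1)), out) := by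
  simp [pvBEnd]

lemma pvBEnd_close (full : List Char) (s0 m1 : Nat) (buf1 : List Char)
    (out : List (String × Option String)) (h : s0 ≠ 2) :
    pvBEnd full s0 (2, m1, buf1) out = ((full, (2, m1, [])),
      if buf1 ≠ [] then out ++ [(String.ofList full, some (String.ofList buf1))] else out) := by
  simp [pvBEnd, h]

lemma pvBEnd_after (full : List Char) (m1 : Nat) (buf1 : List Char)
    (out : List (String × Option String)) :
    pvBEnd full 2 (2, m1, buf1) out = ((full, (2, m1, buf1)), out) := by
  simp [pvBEnd]

lemma pvBEnd_trim (full : List Char) (s0 m1 : Nat) (buf1 : List Char)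
    (out : List (String × Option String)) (h : buf1.length > pvClose.length - 1) :
    pvBEnd full s0 (1, m1, buf1) out =
      ((full, (1, m1, buf1.drop (buf1.length - (pvClose.length - 1)))),
        out ++ [(String.ofList full, some (String.ofList (buf1.take (buf1.length - (pvClose.length - 1)))))]) := by
  simp [pvBEnd, h]

lemma pvBEnd_keep (full : List Char) (s0 m1 : Nat) (buf1 : List Char)
    (out : List (String × Option String)) (h : ¬ buf1.length > pvClose.length - 1) :
    pvBEnd full s0 (1, m1, buf1) out = ((full, (1, m1, buf1)), out) := by
  simp [pvBEnd, h]

lemma pv_tail_sim (full bb cs : List Char) (i : Nat) (oa : List (String × Option String))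
    (s0 : Nat) (hs0 : s0 ≠ 2) (h : PvSt1 bb i) :
    PvRel (pvATail full (bb ++ cs) oa) (pvBEnd full s0 (cs.foldl pvFeed (1, i, bb)) oa) := by
  rcases pv_run1 cs bb i h with ⟨i', hf, hst⟩ | ⟨u, c, v, hcs, hno, hocc, hf⟩
  · rw [hf]
    have hfind : PySem.Chars.find (PySem.Chars.lower (bb ++ cs)) pvClose = -1 :=
      (PySem.Chars.find_eq_neg_one_iff _ _).2 hst.2
    have hkeq : pvClose.length - 1 = pvKeep := by rw [pvClose_len, pvKeep_eq]
    by_cases hlen : (bb ++ cs).length > pvKeep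
    · have hgt : (bb ++ cs).length > pvClose.length - 1 := by rw [hkeq]; exact hlen
      rw [pvATail_none_trim full (bb ++ cs) oa hfind hlen,
        pvBEnd_trim full s0 i' (bb ++ cs) oa hgt, hkeq]
      refine ⟨rfl, rfl, Or.inr (Or.inl ⟨rfl, rfl, rfl, ?_⟩)⟩
      exact pv_st1_trim (bb ++ cs) i' pvKeep hst
        (by have h9 := hst.1.1; rw [pvClose_len] at h9; rw [pvKeep_eq]; omega) (by omega)
    · have hgt : ¬ (bb ++ cs).length > pvClose.length - 1 := by rw [hkeq]; exact hlen
      rw [pvATail_none_keep full (bb ++ cs) oa hfind hlen, pvBEnd_keep full s0 i' (bb ++ cs) oa hgt]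
      exact ⟨rfl, rfl, Or.inr (Or.inl ⟨rfl, rfl, rfl, hst⟩)⟩
  · subst hcs
    have hW : bb ++ (u ++ c :: v) = (bb ++ (u ++ [c])) ++ v := by simp
    have hlowW : PySem.Chars.lower (bb ++ (u ++ [c])) =
        PySem.Chars.lower (bb ++ u) ++ [PySem.Chars.lowerChar c] := by
      rw [show bb ++ (u ++ [c]) = (bb ++ u) ++ [c] by simp, pv_lower_append, pv_lower_singleton]
    have hocc' : pvClose =
        pvTR (PySem.Chars.lower (bb ++ u) ++ [PySem.Chars.lowerChar c]) pvClose.length := by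
      rw [← hlowW]; exact hocc
    have hfind : PySem.Chars.find (PySem.Chars.lower (bb ++ (u ++ c :: v))) pvClose =
        (((bb ++ (u ++ [c])).length - pvClose.length : Nat) : Int) := by
      rw [hW, pv_lower_append, hlowW,
        pv_find_completion _ _ pvClose (PySem.Chars.lowerChar c) (by decide) hno hocc']
      congr 1
      rw [← hlowW, pv_lower_length]
    rw [hf, pvATail_close full (bb ++ (u ++ c :: v)) oa _ hfind,
      pvBEnd_close full s0 0 _ oa hs0]
    have htake : (bb ++ (u ++ c :: v)).take ((bb ++ (u ++ [c])).length - pvClose.length) =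
        (bb ++ (u ++ [c])).take ((bb ++ (u ++ [c])).length - pvClose.length) := by
      rw [hW, List.take_append_of_le_length (by omega)]
    rw [htake]
    exact ⟨rfl, rfl, Or.inr (Or.inr ⟨rfl, rfl⟩)⟩

lemma pv_step (sa : (List Char × PvMode × List Char) × List (String × Option String))
    (sb : (List Char × (Nat × Nat × List Char)) × List (String × Option String))
    (tok : String) (h : PvRel sa sb) : PvRel (pvAStep sa tok) (pvBTok sb tok) := by
  obtain ⟨⟨fa, ma, ha⟩, oa⟩ := sa
  obtain ⟨⟨fb, s, i, bb⟩, ob⟩ := sb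
  obtain ⟨hf, ho, hbr⟩ := h
  simp only at hf ho
  subst hf ho
  rcases hbr with ⟨hma, hs, hst⟩ | ⟨hma, hs, hh, hst⟩ | ⟨hma, hs⟩ <;> simp only at hma hs
  · -- before
    subst hma hs
    simp only [pvAStep, pvBTok]
    rcases pv_run0 tok.toList fa i bb hst with ⟨i', hfold, hst'⟩ | ⟨u, c, v, hcs, hno, hocc, hfold⟩
    · have hfind : PySem.Chars.find (PySem.Chars.lower (fa ++ tok.toList)) pvOpen = -1 :=
        (PySem.Chars.find_eq_neg_one_iff _ _).2 hst'.2
      rw [hfind, if_pos rfl, hfold, pvBEnd_state0]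
      exact ⟨rfl, rfl, Or.inl ⟨rfl, rfl, hst'⟩⟩
    · have hW : fa ++ tok.toList = (fa ++ (u ++ [c])) ++ v := by rw [hcs]; simp
      have hlowW : PySem.Chars.lower (fa ++ (u ++ [c])) =
          PySem.Chars.lower (fa ++ u) ++ [PySem.Chars.lowerChar c] := by
        rw [show fa ++ (u ++ [c]) = (fa ++ u) ++ [c] by simp, pv_lower_append, pv_lower_singleton]
      have hocc' : pvOpen =
          pvTR (PySem.Chars.lower (fa ++ u) ++ [PySem.Chars.lowerChar c]) pvOpen.length := by
        rw [← hlowW]; exact hocc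
      have hfind : PySem.Chars.find (PySem.Chars.lower (fa ++ tok.toList)) pvOpen =
          (((fa ++ (u ++ [c])).length - pvOpen.length : Nat) : Int) := by
        rw [hW, pv_lower_append, hlowW,
          pv_find_completion _ _ pvOpen (PySem.Chars.lowerChar c) (by decide) hno hocc']
        congr 1
        rw [← hlowW, pv_lower_length]
      have hlenW : pvOpen.length ≤ (fa ++ (u ++ [c])).length := by
        have hle := congrArg List.length hocc
        simp only [pvTR, List.length_drop, pv_lower_length] at hle
        omega
      have hfull : PySem.List.slice (fa ++ tok.toList)
          (some ((((fa ++ (u ++ [c])).length - pvOpen.length : Nat) : Int) + (pvOpen.length : Int))) none = v := by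
        have hcast : ((((fa ++ (u ++ [c])).length - pvOpen.length : Nat) : Int) + (pvOpen.length : Int))
            = (((fa ++ (u ++ [c])).length : Nat) : Int) := by omega
        rw [hcast, pv_slice_from_nat, hW, List.drop_left]
      rw [hfind, if_neg (by omega), hfull, hfold]
      have htail := pv_tail_sim (fa ++ tok.toList) [] v 0 oa 0 (by decide) pv_st1_nil
      rwa [List.nil_append] at htail
  · -- inAns
    subst hma hs hh
    simp only [pvAStep, pvBTok]
    exact pv_tail_sim (fa ++ tok.toList) ha tok.toList i oa 1 (by decide) hst
  · -- after
    subst hma hs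
    simp only [pvAStep, pvBTok]
    rw [pv_run2, pvBEnd_after]
    exact ⟨rfl, rfl, Or.inr (Or.inr ⟨rfl, rfl⟩)⟩

lemma pv_fold (toks : List String)
    (sa : (List Char × PvMode × List Char) × List (String × Option String))
    (sb : (List Char × (Nat × Nat × List Char)) × List (String × Option String))
    (h : PvRel sa sb) : PvRel (toks.foldl pvAStep sa) (toks.foldl pvBTok sb) := by
  induction toks generalizing sa sb with
  | nil => exact h
  | cons t ts ih => exact ih _ _ (pv_step sa sb t h)

-- ===== VERDICT (by name: the statement is the Claim_ definition above) =====
theorem stream_answer_tokens_spec : Claim_equal_stream_answer_tokens := by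
  intro raw_stream _
  unfold Spec_stream_answer_tokens stream_answer_tokens stream_answer_tokens_alt
  have h0 : PvRel (([], PvMode.before, []), []) (([], (0, 0, [])), []) :=
    ⟨rfl, rfl, Or.inl ⟨rfl, rfl, pv_st0_nil⟩⟩
  have h := pv_fold raw_stream _ _ h0
  revert h
  generalize raw_stream.foldl pvAStep (([], PvMode.before, []), []) = sA
  generalize raw_stream.foldl pvBTok (([], (0, 0, [])), []) = sB
  intro h
  obtain ⟨⟨fa, ma, ha⟩, oa⟩ := sA
  obtain ⟨⟨fb, s, i, bb⟩, ob⟩ := sB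
  obtain ⟨hf, ho, hbr⟩ := h
  simp only at hf ho
  subst hf ho
  rcases hbr with ⟨hma, hs, -⟩ | ⟨hma, hs, hh, -⟩ | ⟨hma, hs⟩ <;> simp only at hma hs
  · subst hma hs
    simp
  · subst hma hs hh
    simp
  · subst hma hs
    simp
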